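-- pv_equiv track=rewrite | github.com/servaltullius/calamity-reactive-loot-affixes | scripts/vibe_kit/brain/change_coupling.py | parse_git_log_name_only
-- ===== SOURCE A (Python) =====
-- COMMIT_MARKER = "__VIBE_COMMIT__"
--
-- def parse_git_log_name_only(text: str) -> list[list[str]]:
--     commits: list[list[str]] = []
--     cur: list[str] = []
--     for raw in text.splitlines():
--         line = raw.strip()
--         if not line:
--             continue
--         if line.startswith(COMMIT_MARKER):
--             if cur:
--                 commits.append(cur)
--             cur = []
--             continue
--         cur.append(line)
--     if cur:
--         commits.append(cur)
--     return commits
-- ===== SOURCE B (Python) =====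
-- COMMIT_MARKER = "__VIBE_COMMIT__"
--
-- def parse_git_log_name_only(text: str) -> list[list[str]]:
--     # Filter-then-group: normalize to nonempty stripped lines, then slice the
--     # list into maximal runs of same "is marker" key, keeping non-marker runs.
--     lines = [line for line in (raw.strip() for raw in text.splitlines()) if line]
--     commits: list[list[str]] = []
--     i, n = 0, len(lines)
--     while i < n:
--         is_marker = lines[i].startswith(COMMIT_MARKER)
--         j = i + 1
--         while j < n and lines[j].startswith(COMMIT_MARKER) == is_marker:
--             j += 1
--         if not is_marker:
--             commits.append(lines[i:j])
--         i = j
--     return commits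
-- ===== Notes on version B (the rewrite author's own statement) =====
-- stated objective: alternative
-- what changed: Replaces A's stateful accumulator (cur list flushed at markers) by a filter-then-group pipeline: normalize lines first, then partition the list into maximal runs of marker/non-marker lines and keep the non-marker runs.
import Mathlib
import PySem

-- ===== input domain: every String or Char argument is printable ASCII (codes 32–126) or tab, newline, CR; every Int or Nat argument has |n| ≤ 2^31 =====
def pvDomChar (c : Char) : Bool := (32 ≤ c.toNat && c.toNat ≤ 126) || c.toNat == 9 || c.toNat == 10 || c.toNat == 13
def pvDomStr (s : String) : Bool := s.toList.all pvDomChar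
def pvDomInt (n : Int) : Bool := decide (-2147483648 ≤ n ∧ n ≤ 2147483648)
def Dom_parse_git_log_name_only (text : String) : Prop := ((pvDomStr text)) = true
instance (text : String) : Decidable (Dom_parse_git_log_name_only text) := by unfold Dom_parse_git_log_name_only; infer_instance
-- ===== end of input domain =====

-- B replaces A's stateful accumulator by a filter-then-group pipeline (same cost, alternative decomposition).

-- ===== PORT A =====
-- A's loop body: state is (commits, cur); strip, skip blanks, flush at markers, else collect.
def pvStepA (st : List (List String) × List String) (raw : String) :
    List (List String) × List String :=
  let line := PySem.Str.strip raw
  if line = "" then st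
  else if PySem.Str.startswith line "__VIBE_COMMIT__" then
    ((if st.2 = [] then st.1 else st.1 ++ [st.2]), [])
  else (st.1, st.2 ++ [line])

def parse_git_log_name_only (text : String) : List (List String) :=
  let st := (PySem.Str.splitlines text).foldl pvStepA ([], [])
  if st.2 = [] then st.1 else st.1 ++ [st.2]

-- ===== PORT B =====
-- B's run scanner: slice off the maximal run sharing the head's marker-key; keep non-marker runs.
def pvRunsB : List String → List (List String)
  | [] => []
  | l :: ls =>
    let k := PySem.Str.startswith l "__VIBE_COMMIT__"
    let g := ls.takeWhile (fun x => PySem.Str.startswith x "__VIBE_COMMIT__" == k)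
    let rest := pvRunsB (ls.dropWhile (fun x => PySem.Str.startswith x "__VIBE_COMMIT__" == k))
    if k then rest else (l :: g) :: rest
termination_by ls => ls.length
decreasing_by
  exact Nat.lt_succ_of_le (List.length_dropWhile_le _ _)

def parse_git_log_name_only_alt (text : String) : List (List String) :=
  pvRunsB (((PySem.Str.splitlines text).map PySem.Str.strip).filter (fun l => decide (l ≠ "")))

-- ===== PRECONDITION & SPEC =====
def Spec_parse_git_log_name_only (text : String) (out : List (List String)) : Prop := out = parse_git_log_name_only_alt text
instance (text : String) (out : List (List String)) : Decidable (Spec_parse_git_log_name_only text out) := by unfold Spec_parse_git_log_name_only; infer_instance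

-- ===== CLAIM (what is proved, stated in full; the proofs are below) =====
def Claim_equal_parse_git_log_name_only : Prop := ∀ (text : String), Dom_parse_git_log_name_only text → Spec_parse_git_log_name_only text (parse_git_log_name_only text)

-- ===== LEMMAS AND PROOFS =====

def pvFlush (cur : List String) : List (List String) := if cur = [] then [] else [cur]

-- reference recursion: A's loop on already-stripped nonblank lines
def pvRunsC (cur : List String) : List String → List (List String)
  | [] => pvFlush cur
  | l :: ls =>
    if PySem.Str.startswith l "__VIBE_COMMIT__" then pvFlush cur ++ pvRunsC [] ls
    else pvRunsC (cur ++ [l]) ls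

theorem pvFoldA (lines : List String) : ∀ (acc : List (List String)) (cur : List String),
    (let st := lines.foldl pvStepA (acc, cur); if st.2 = [] then st.1 else st.1 ++ [st.2])
    = acc ++ pvRunsC cur ((lines.map PySem.Str.strip).filter (fun l => decide (l ≠ ""))) := by
  induction lines with
  | nil => intro acc cur; simp [pvRunsC, pvFlush]; split <;> simp
  | cons raw ls ih =>
    intro acc cur
    simp only [List.foldl_cons, List.map_cons, List.filter_cons]
    by_cases h0 : PySem.Str.strip raw = ""
    · have hstep : pvStepA (acc, cur) raw = (acc, cur) := by
        simp only [pvStepA]; rw [if_pos h0]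
      rw [hstep]
      simp [h0, ih]
    · by_cases hm : PySem.Str.startswith (PySem.Str.strip raw) "__VIBE_COMMIT__" = true
      · have hstep : pvStepA (acc, cur) raw = ((if cur = [] then acc else acc ++ [cur]), []) := by
          simp only [pvStepA]; rw [if_neg h0, if_pos hm]
        rw [hstep, ih]
        simp only [h0, ne_eq, not_false_iff, decide_true, if_true, pvRunsC, hm]
        simp [pvFlush]; split <;> simp
      · have hstep : pvStepA (acc, cur) raw = (acc, cur ++ [PySem.Str.strip raw]) := by
          simp only [pvStepA]; rw [if_neg h0, if_neg hm]
        rw [hstep, ih]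
        simp only [h0, ne_eq, not_false_iff, decide_true, if_true, pvRunsC]
        rw [if_neg hm]

theorem pvDropWhileHead {α : Type} (p : α → Bool) : ∀ (ls : List α) (x : α) (xs : List α),
    ls.dropWhile p = x :: xs → p x = false := by
  intro ls
  induction ls with
  | nil => intro x xs h; simp [List.dropWhile] at h
  | cons a t ih =>
    intro x xs h
    by_cases ha : p a = true
    · rw [List.dropWhile_cons_of_pos ha] at h; exact ih x xs h
    · rw [List.dropWhile_cons_of_neg ha] at h
      cases h; simpa using ha

-- marker lines at the front are skipped by pvRunsC with empty accumulator
theorem pvL0 : ∀ (g rest : List String),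
    (∀ x ∈ g, PySem.Str.startswith x "__VIBE_COMMIT__" = true) →
    pvRunsC [] (g ++ rest) = pvRunsC [] rest := by
  intro g
  induction g with
  | nil => intro rest _; simp
  | cons a t ih =>
    intro rest h
    have ha := h a (by simp)
    simp only [List.cons_append, pvRunsC, ha]
    simp [pvFlush, ih rest (fun x hx => h x (by simp [hx]))]

-- non-marker lines at the front are accumulated
theorem pvL1 : ∀ (g : List String), ∀ (cur rest : List String),
    (∀ x ∈ g, PySem.Str.startswith x "__VIBE_COMMIT__" = false) →
    pvRunsC cur (g ++ rest) = pvRunsC (cur ++ g) rest := by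
  intro g
  induction g with
  | nil => intro cur rest _; simp
  | cons a t ih =>
    intro cur rest h
    have ha := h a (by simp)
    simp only [List.cons_append, pvRunsC, ha, Bool.false_eq_true, if_false]
    rw [ih (cur ++ [a]) rest (fun x hx => h x (by simp [hx]))]
    simp

-- a nonempty pending group flushes before a marker line (or the end)
theorem pvL2 : ∀ (rest cur : List String), cur ≠ [] →
    (rest = [] ∨ ∃ m rest', rest = m :: rest' ∧ PySem.Str.startswith m "__VIBE_COMMIT__" = true) →
    pvRunsC cur rest = cur :: pvRunsC [] rest := by
  intro rest cur hcur h
  rcases h with h | ⟨m, rest', rfl, hm⟩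
  · subst h; simp [pvRunsC, pvFlush, hcur]
  · simp only [pvRunsC, hm]
    simp [pvFlush, hcur]

theorem pvCeqB : ∀ (n : Nat) (ls : List String), ls.length ≤ n → pvRunsC [] ls = pvRunsB ls := by
  intro n
  induction n with
  | zero =>
    intro ls h
    have : ls = [] := List.eq_nil_of_length_eq_zero (Nat.le_zero.mp h)
    subst this; simp [pvRunsC, pvRunsB, pvFlush]
  | succ n ih =>
    intro ls h
    cases ls with
    | nil => simp [pvRunsC, pvRunsB, pvFlush]
    | cons l ls' =>
      have hlen : ls'.length ≤ n := by simpa using h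
      set k := PySem.Str.startswith l "__VIBE_COMMIT__" with hk
      set p : String → Bool := fun x => PySem.Str.startswith x "__VIBE_COMMIT__" == k with hp
      have hsplit : ls'.takeWhile p ++ ls'.dropWhile p = ls' := List.takeWhile_append_dropWhile
      have hrestlen : (ls'.dropWhile p).length ≤ n :=
        le_trans (List.length_dropWhile_le _ _) hlen
      have htake : ∀ x ∈ ls'.takeWhile p, PySem.Str.startswith x "__VIBE_COMMIT__" = k := by
        intro x hx
        have hx' := List.mem_takeWhile_imp hx
        simp only [hp, beq_iff_eq] at hx'
        exact hx'
      have hBeq : pvRunsB (l :: ls') =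
          (if k then pvRunsB (ls'.dropWhile p)
           else (l :: ls'.takeWhile p) :: pvRunsB (ls'.dropWhile p)) := by
        rw [pvRunsB]
      cases hkk : k with
      | true =>
        have hl : PySem.Str.startswith l "__VIBE_COMMIT__" = true := hk.symm.trans hkk
        calc pvRunsC [] (l :: ls')
            = pvRunsC [] ls' := by
              simp only [pvRunsC, hl]; simp [pvFlush]
          _ = pvRunsC [] (ls'.takeWhile p ++ ls'.dropWhile p) := by rw [hsplit]
          _ = pvRunsC [] (ls'.dropWhile p) :=
              pvL0 _ _ (fun x hx => (htake x hx).trans hkk)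
          _ = pvRunsB (ls'.dropWhile p) := ih _ hrestlen
          _ = pvRunsB (l :: ls') := by rw [hBeq, hkk]; simp
      | false =>
        have hl : PySem.Str.startswith l "__VIBE_COMMIT__" = false := hk.symm.trans hkk
        calc pvRunsC [] (l :: ls')
            = pvRunsC [l] ls' := by
              simp only [pvRunsC, hl, Bool.false_eq_true, if_false]; simp
          _ = pvRunsC [l] (ls'.takeWhile p ++ ls'.dropWhile p) := by rw [hsplit]
          _ = pvRunsC ([l] ++ ls'.takeWhile p) (ls'.dropWhile p) :=
              pvL1 _ _ _ (fun x hx => (htake x hx).trans hkk)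
          _ = ([l] ++ ls'.takeWhile p) :: pvRunsC [] (ls'.dropWhile p) := by
              apply pvL2 _ _ (by simp)
              cases hdw : ls'.dropWhile p with
              | nil => left; rfl
              | cons m rest' =>
                right
                have hpm := pvDropWhileHead p ls' m rest' hdw
                simp only [hp, hkk] at hpm
                refine ⟨m, rest', rfl, ?_⟩
                cases h' : PySem.Str.startswith m "__VIBE_COMMIT__" with
                | true => rfl
                | false => rw [h'] at hpm; simp at hpm
          _ = ([l] ++ ls'.takeWhile p) :: pvRunsB (ls'.dropWhile p) := by rw [ih _ hrestlen]
          _ = pvRunsB (l :: ls') := by rw [hBeq, hkk]; simp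

-- ===== VERDICT (by name: the statement is the Claim_ definition above) =====
theorem parse_git_log_name_only_spec : Claim_equal_parse_git_log_name_only := by
  intro text _
  unfold Spec_parse_git_log_name_only parse_git_log_name_only parse_git_log_name_only_alt
  rw [pvFoldA]
  simp only [List.nil_append]
  exact pvCeqB _ _ (le_refl _)
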